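-- pv_equiv track=rewrite | github.com/syyynth/hyperskill | python/0391 - X-mas Tree/task/xmasstree.py | create_layer
-- ===== SOURCE A (Python) =====
-- def create_layer(k, interval):
--     tree_width = 2 * k - 3
--     layer = ['*'] * tree_width
--     possible_ball_start = (k - 2) * (k - 3) // 2
--
--     for i in range(tree_width):
--         if i % 2:
--             if not possible_ball_start % interval:
--                 layer[i] = 'O'
--             possible_ball_start += 1
--
--     return ''.join(layer)
-- ===== SOURCE B (Python) =====
-- def create_layer(k, interval):
--     tree_width = 2 * k - 3
--     layer = ['*'] * tree_width
--     if tree_width >= 2: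
--         step = abs(interval)
--         c0 = (k - 2) * (k - 3) // 2
--         j = (-c0) % step
--         while 2 * j + 1 < tree_width:
--             layer[2 * j + 1] = 'O'
--             j += step
--     return ''.join(layer)
-- ===== Notes on version B (the rewrite author's own statement) =====
-- stated objective: faster
-- what changed: Instead of scanning every index with a parity test and a modulo per odd index, B computes the first ball offset j0=(-c0)%abs(interval) once and strides directly over ball positions 2*j0+1, 2*(j0+step)+1, ..., setting them in a pre-built list of '*'.
import Mathlib
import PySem

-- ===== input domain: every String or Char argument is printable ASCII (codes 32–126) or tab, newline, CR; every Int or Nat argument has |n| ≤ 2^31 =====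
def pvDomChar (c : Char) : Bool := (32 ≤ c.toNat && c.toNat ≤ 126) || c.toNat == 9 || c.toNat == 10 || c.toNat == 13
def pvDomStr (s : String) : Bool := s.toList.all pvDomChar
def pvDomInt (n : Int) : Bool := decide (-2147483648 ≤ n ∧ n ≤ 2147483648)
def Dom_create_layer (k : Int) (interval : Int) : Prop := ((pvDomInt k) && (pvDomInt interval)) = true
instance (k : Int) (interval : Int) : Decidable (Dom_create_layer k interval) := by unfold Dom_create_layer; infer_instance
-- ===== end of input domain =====

-- B replaces A's full scan with parity/modulo tests at every index by a direct stride over the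
-- ball positions 2j+1, j = j0, j0+|interval|, …, starting from j0 = (-c0) % |interval| (alternative decomposition).

-- ===== PORT A =====
def create_layer (k : Int) (interval : Int) : String :=
  let tree_width : Int := 2 * k - 3
  let layer : List Char := List.replicate tree_width.toNat '*'          -- ['*'] * tree_width (negative → empty)
  let possible_ball_start : Int := PySem.Int.floordiv ((k - 2) * (k - 3)) 2
  let st := (PySem.List.pyRange 0 tree_width 1).foldl
    (fun (st : List Char × Int) i =>
      if PySem.Int.mod i 2 ≠ 0 then                                    -- if i % 2:
        (if PySem.Int.mod st.2 interval = 0 then PySem.List.pySetD st.1 i 'O' else st.1,   -- layer[i] = 'O' (index always in range)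
         st.2 + 1)
      else st)
    (layer, possible_ball_start)
  String.mk st.1

-- ===== PORT B =====
-- while 2*j+1 < tree_width: layer[2*j+1] = 'O'; j += step.
-- '0 < step' in the guard is a totality guard only: step = |interval| = 0 only when interval = 0,
-- which Pre_ excludes (the Python raises ZeroDivisionError before the loop there).
def ballLoop (tree_width step j : Int) (layer : List Char) : List Char :=
  if h : 2 * j + 1 < tree_width ∧ 0 < step then
    ballLoop tree_width step (j + step) (PySem.List.pySetD layer (2 * j + 1) 'O')
  else layer
termination_by (tree_width - 2 * j).toNat
decreasing_by omega

def create_layer_alt (k : Int) (interval : Int) : String :=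
  let tree_width : Int := 2 * k - 3
  let layer : List Char := List.replicate tree_width.toNat '*'
  if 2 ≤ tree_width then
    let step : Int := |interval|
    let c0 : Int := PySem.Int.floordiv ((k - 2) * (k - 3)) 2
    let j : Int := PySem.Int.mod (-c0) step
    String.mk (ballLoop tree_width step j layer)
  else String.mk layer

-- ===== PRECONDITION & SPEC =====
-- Pre_ excludes exactly interval = 0 with tree_width ≥ 2: there A hits 'possible_ball_start % 0' and
-- raises ZeroDivisionError (and B raises the same way at '(-c0) % 0').
def Pre_create_layer (k : Int) (interval : Int) : Prop := interval ≠ 0 ∨ 2 * k - 3 < 2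
instance (k : Int) (interval : Int) : Decidable (Pre_create_layer k interval) := by unfold Pre_create_layer; infer_instance
def pvWitness_create_layer : Int × Int := (5, 3)

def Spec_create_layer (k : Int) (interval : Int) (out : String) : Prop := out = create_layer_alt k interval
instance (k : Int) (interval : Int) (out : String) : Decidable (Spec_create_layer k interval out) := by unfold Spec_create_layer; infer_instance

-- ===== CLAIM (what is proved, stated in full; the proofs are below) =====
def Claim_equal_create_layer : Prop := ∀ (k : Int) (interval : Int), Dom_create_layer k interval → Pre_create_layer k interval → Spec_create_layer k interval (create_layer k interval)

-- ===== LEMMAS AND PROOFS =====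

-- the common elementwise description: index i is a ball iff i is odd and interval divides c0 + i/2
def specChar (interval c0 : Int) (i : Nat) : Char :=
  if i % 2 = 1 ∧ PySem.Int.mod (c0 + (i : Int) / 2) interval = 0 then 'O' else '*'

lemma set_map_range {n m : Nat} (g : Nat → Char) (v : Char) (hm : m < n) :
    ((List.range n).map g).set m v = (List.range n).map (fun i => if i = m then v else g i) := by
  apply List.ext_getElem
  · simp
  · intro i h1 h2
    simp only [List.length_set, List.length_map, List.length_range] at h1
    simp only [List.getElem_set, List.getElem_map, List.getElem_range]
    by_cases h : i = m
    · simp [h]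
    · simp [h, Ne.symm h]

lemma A_inv (interval c0 tw : Int) (m : Nat) (hm : (m : Int) ≤ tw) :
    (PySem.List.pyRange 0 (m : Int) 1).foldl
      (fun (st : List Char × Int) i =>
        if PySem.Int.mod i 2 ≠ 0 then
          (if PySem.Int.mod st.2 interval = 0 then PySem.List.pySetD st.1 i 'O' else st.1, st.2 + 1)
        else st)
      (List.replicate tw.toNat '*', c0)
    = ((List.range tw.toNat).map (fun i => if i < m then specChar interval c0 i else '*'),
       c0 + ((m / 2 : Nat) : Int)) := by
  induction m with
  | zero =>
      rw [PySem.List.pyRange_one_eq_nil (by norm_num)]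
      simp [List.map_const']
  | succ m ih =>
      have hm' : (m : Int) ≤ tw := by push_cast at hm ⊢; omega
      have hcast : ((m + 1 : Nat) : Int) = (m : Int) + 1 := by push_cast; ring
      rw [hcast, PySem.List.pyRange_one_succ_right (by positivity), List.foldl_append, ih hm']
      simp only [List.foldl_cons, List.foldl_nil]
      have hmod : PySem.Int.mod (m : Int) 2 = ((m % 2 : Nat) : Int) := PySem.Int.mod_natCast m 2
      have hc2 : ((m / 2 : Nat) : Int) = (m : Int) / 2 := by omega
      by_cases hpar : m % 2 = 1
      · -- odd index: counter tested, possibly set, counter incremented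
        rw [if_pos (by rw [hmod, hpar]; norm_num)]
        have hmn : m < tw.toNat := by omega
        by_cases hz : PySem.Int.mod (c0 + ((m / 2 : Nat) : Int)) interval = 0
        · rw [if_pos hz]
          have hz' : PySem.Int.mod (c0 + (m : Int) / 2) interval = 0 := by rwa [hc2] at hz
          simp only [Prod.mk.injEq]
          constructor
          · rw [PySem.List.pySetD_natCast, set_map_range _ _ hmn]
            apply List.map_congr_left
            intro i _
            by_cases hieq : i = m
            · subst hieq
              rw [if_pos rfl, if_pos (by omega)]
              unfold specChar
              rw [if_pos ⟨hpar, hz'⟩]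
            · rw [if_neg hieq]
              by_cases h1 : i < m
              · rw [if_pos h1, if_pos (by omega)]
              · rw [if_neg h1, if_neg (by omega)]
          · omega
        · rw [if_neg hz]
          have hz' : ¬ PySem.Int.mod (c0 + (m : Int) / 2) interval = 0 := by rwa [hc2] at hz
          simp only [Prod.mk.injEq]
          constructor
          · apply List.map_congr_left
            intro i _
            by_cases hieq : i = m
            · subst hieq
              rw [if_neg (lt_irrefl _), if_pos (by omega)]
              unfold specChar
              rw [if_neg (fun h => hz' h.2)]
            · by_cases h1 : i < m
              · rw [if_pos h1, if_pos (by omega)]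
              · rw [if_neg h1, if_neg (by omega)]
          · omega
      · -- even index: nothing happens
        have hpar0 : m % 2 = 0 := by omega
        rw [if_neg (by rw [hmod, hpar0]; norm_num)]
        simp only [Prod.mk.injEq]
        constructor
        · apply List.map_congr_left
          intro i _
          by_cases hieq : i = m
          · subst hieq
            rw [if_neg (lt_irrefl _), if_pos (by omega)]
            unfold specChar
            rw [if_neg (fun h => hpar h.1)]
          · by_cases h1 : i < m
            · rw [if_pos h1, if_pos (by omega)]
            · rw [if_neg h1, if_neg (by omega)]
        · omega

lemma A_eq_spec (k interval : Int) :
    create_layer k interval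
      = String.mk ((List.range (2 * k - 3).toNat).map
          (specChar interval (PySem.Int.floordiv ((k - 2) * (k - 3)) 2))) := by
  simp only [create_layer]
  by_cases h : 0 ≤ 2 * k - 3
  · have hc : ((2 * k - 3).toNat : Int) = 2 * k - 3 := by omega
    rw [show PySem.List.pyRange 0 (2 * k - 3) 1
          = PySem.List.pyRange 0 (((2 * k - 3).toNat : Nat) : Int) 1 by rw [hc]]
    rw [A_inv interval _ (2 * k - 3) (2 * k - 3).toNat (by omega)]
    simp only []
    congr 1
    apply List.map_congr_left
    intro i hi
    rw [if_pos (List.mem_range.mp hi)]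
  · rw [PySem.List.pyRange_one_eq_nil (by omega)]
    simp [show (2 * k - 3).toNat = 0 by omega]

-- characterisation of B's stride loop, elementwise
lemma ballLoop_getElem? (tw step : Int) (hstep : 0 < step) :
    ∀ (n : Nat) (j : Int), (tw - 2 * j).toNat ≤ n → 0 ≤ j →
    ∀ (layer : List Char), (layer.length : Int) = tw → ∀ i : Nat,
      (ballLoop tw step j layer)[i]? =
        if ((i : Int) < tw ∧ i % 2 = 1 ∧ j ≤ ((i / 2 : Nat) : Int) ∧ (((i / 2 : Nat) : Int) - j) % step = 0)
        then some 'O' else layer[i]? := by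
  intro n
  induction n with
  | zero =>
      intro j hn hj layer hlen i
      rw [ballLoop, dif_neg (by omega)]
      rw [if_neg]
      rintro ⟨h1, h2, h3, _⟩
      omega
  | succ n ih =>
      intro j hn hj layer hlen i
      rw [ballLoop]
      by_cases hlt : 2 * j + 1 < tw
      · rw [dif_pos ⟨hlt, hstep⟩]
        have hset : PySem.List.pySetD layer (2 * j + 1) 'O' = layer.set (2 * j + 1).toNat 'O' :=
          PySem.List.pySetD_of_nonneg layer 'O' (by omega)
        rw [ih (j + step) (by omega) (by omega) _ (by rw [hset]; simp [hlen]) i]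
        by_cases hc2 : ((i : Int) < tw ∧ i % 2 = 1 ∧ j + step ≤ ((i / 2 : Nat) : Int)
            ∧ (((i / 2 : Nat) : Int) - (j + step)) % step = 0)
        · rw [if_pos hc2, if_pos]
          refine ⟨hc2.1, hc2.2.1, by omega, ?_⟩
          have hd := Int.dvd_of_emod_eq_zero hc2.2.2.2
          have heq : ((i / 2 : Nat) : Int) - j = (((i / 2 : Nat) : Int) - (j + step)) + step := by ring
          rw [heq]
          exact Int.emod_eq_zero_of_dvd (hd.add (dvd_refl step))
        · rw [if_neg hc2]
          by_cases hieq : (i : Int) = 2 * j + 1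
          · rw [if_pos]
            · have hieqn : i = (2 * j + 1).toNat := by omega
              rw [hset, hieqn, List.getElem?_set_eq_of_lt 'O' (by omega)]
            · refine ⟨by omega, by omega, by omega, ?_⟩
              have h0 : ((i / 2 : Nat) : Int) - j = 0 := by omega
              rw [h0]
              exact Int.zero_emod step
          · rw [hset, List.getElem?_set_ne (by omega)]
            rw [if_neg]
            rintro ⟨h1, h2, h3, h4⟩
            -- i odd, j ≤ i/2, step ∣ i/2 - j, i ≠ 2j+1 ⇒ i/2 ≥ j + step
            have hdvd : step ∣ (((i / 2 : Nat) : Int) - j) := Int.dvd_of_emod_eq_zero h4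
            have hge : step ≤ ((i / 2 : Nat) : Int) - j := Int.le_of_dvd (by omega) hdvd
            refine hc2 ⟨h1, h2, by omega, ?_⟩
            have heq : ((i / 2 : Nat) : Int) - (j + step) = (((i / 2 : Nat) : Int) - j) - step := by ring
            rw [heq]
            exact Int.emod_eq_zero_of_dvd (hdvd.sub (dvd_refl step))
      · rw [dif_neg (by tauto)]
        rw [if_neg]
        rintro ⟨h1, h2, h3, _⟩
        omega

-- arithmetic heart: ball at counter value c0 + m  ⟺  m lies on the stride from j0 = (-c0) % |interval|
lemma key_iff (interval c0 : Int) (hne : interval ≠ 0) (m : Int) (hm : 0 ≤ m) :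
    (PySem.Int.mod (c0 + m) interval = 0) ↔
      (PySem.Int.mod (-c0) |interval| ≤ m ∧ (m - PySem.Int.mod (-c0) |interval|) % |interval| = 0) := by
  set s : Int := |interval| with hs
  have hspos : 0 < s := abs_pos.mpr hne
  set j0 : Int := PySem.Int.mod (-c0) s with hj0
  have hj0nn : 0 ≤ j0 := PySem.Int.mod_nonneg _ hspos
  have hj0lt : j0 < s := PySem.Int.mod_lt _ hspos
  have hbase : s ∣ (c0 + j0) := by
    have := PySem.Int.floordiv_mul_add_mod (-c0) s
    exact ⟨-(PySem.Int.floordiv (-c0) s), by linarith⟩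
  rw [PySem.Int.mod_eq_zero_iff_dvd]
  rw [show (interval ∣ c0 + m) ↔ (s ∣ c0 + m) from (abs_dvd _ _).symm]
  constructor
  · intro hdvd
    have hd2 : s ∣ (m - j0) := by
      have h := hdvd.sub hbase
      have h3 : c0 + m - (c0 + j0) = m - j0 := by ring
      rwa [h3] at h
    have hle : j0 ≤ m := by
      by_contra hlt
      rw [Int.not_le] at hlt
      have h4 : s ∣ (j0 - m) := by
        have := (dvd_neg (α := Int)).mpr hd2
        rwa [neg_sub] at this
      have h6 : s ≤ j0 - m := Int.le_of_dvd (by omega) h4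
      omega
    exact ⟨hle, Int.emod_eq_zero_of_dvd hd2⟩
  · rintro ⟨hle, hmod⟩
    have hd2 : s ∣ (m - j0) := Int.dvd_of_emod_eq_zero hmod
    have h := hbase.add hd2
    have h3 : (c0 + j0) + (m - j0) = c0 + m := by ring
    rwa [h3] at h

-- ===== VERDICT (by name: the statement is the Claim_ definition above) =====
theorem create_layer_spec : Claim_equal_create_layer := by
  intro k interval _hdom hpre
  unfold Spec_create_layer
  rw [A_eq_spec]
  simp only [create_layer_alt]
  by_cases h2 : 2 ≤ 2 * k - 3
  · rw [if_pos h2]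
    have hne : interval ≠ 0 := by
      rcases hpre with h | h
      · exact h
      · omega
    have hspos : 0 < |interval| := abs_pos.mpr hne
    set c0 : Int := PySem.Int.floordiv ((k - 2) * (k - 3)) 2 with hc0
    set j0 : Int := PySem.Int.mod (-c0) |interval| with hj0
    have hj0nn : 0 ≤ j0 := PySem.Int.mod_nonneg _ hspos
    congr 1
    symm
    apply List.ext_getElem?
    intro i
    rw [ballLoop_getElem? (2 * k - 3) |interval| hspos ((2 * k - 3 - 2 * j0).toNat) j0 (le_refl _)
        hj0nn _ (by simp; omega) i]
    have hcd : ((i / 2 : Nat) : Int) = (i : Int) / 2 := by omega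
    by_cases hi : i < (2 * k - 3).toNat
    · rw [List.getElem?_map, List.getElem?_range hi]
      simp only [Option.map_some]
      by_cases hpar : i % 2 = 1
      · have hkey := key_iff interval c0 hne ((i : Int) / 2) (by omega)
        by_cases hz : PySem.Int.mod (c0 + (i : Int) / 2) interval = 0
        · rw [if_pos]
          · unfold specChar
            rw [if_pos ⟨hpar, hz⟩]
          · obtain ⟨ha, hb⟩ := hkey.mp hz
            exact ⟨by omega, hpar, by omega, by rw [hcd]; exact hb⟩
        · rw [if_neg]
          · rw [List.getElem?_replicate, if_pos hi]
            unfold specChar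
            rw [if_neg (fun h => hz h.2)]
          · rintro ⟨q1, q2, q3, q4⟩
            rw [hcd] at q3 q4
            exact hz (hkey.mpr ⟨q3, q4⟩)
      · rw [if_neg (fun h => hpar h.2.1)]
        rw [List.getElem?_replicate, if_pos hi]
        unfold specChar
        rw [if_neg (fun h => hpar h.1)]
    · rw [if_neg (fun h => hi (by omega))]
      rw [List.getElem?_replicate, if_neg hi]
      rw [List.getElem?_eq_none (by simp; omega)]
  · rw [if_neg h2]
    congr 1
    have hn : (2 * k - 3).toNat ≤ 1 := by omega
    rw [List.eq_replicate_iff]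
    refine ⟨by simp, ?_⟩
    intro c hc
    simp only [List.mem_map, List.mem_range] at hc
    obtain ⟨i, hi, rfl⟩ := hc
    have hi0 : i = 0 := by omega
    subst hi0
    unfold specChar
    rw [if_neg (by norm_num)]
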